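-- pv_equiv track=rewrite | github.com/boggdan95/photo-to-post | scripts/scheduler.py | _apply_diversity_rule
-- ===== SOURCE A (Python) =====
-- def _apply_diversity_rule(posts, max_consecutive):
--     """Reorder posts so no more than max_consecutive from the same country appear in a row."""
--     if not posts or max_consecutive <= 0:
--         return posts
--
--     result = []
--     remaining = list(posts)
--
--     while remaining:
--         placed = False
--         for i, post in enumerate(remaining):
--             # Check if placing this post would violate the rule
--             recent = [p.get("country") for p in result[-max_consecutive:]]
--             if len(recent) < max_consecutive or not all(c == post.get("country") for c in recent):
--                 result.append(remaining.pop(i))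
--                 placed = True
--                 break
--
--         if not placed:
--             # Can't avoid violation, just append the rest
--             result.extend(remaining)
--             break
--
--     return result
-- ===== SOURCE B (Python) =====
-- from collections import deque
--
--
-- def _apply_diversity_rule(posts, max_consecutive):
--     """Reorder posts so no more than max_consecutive from the same country appear in a row.
--
--     One pass: posts are emitted in order; a post that would extend the current
--     run past the limit is deferred to a queue and drained as soon as allowed.
--     """
--     if not posts or max_consecutive <= 0:
--         return posts
--
--     result = []
--     pending = deque()
--     run_country, run_len = None, 0
--
--     def place(post):
--         nonlocal run_country, run_len
--         c = post.get("country")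
--         run_len = run_len + 1 if (run_len and c == run_country) else 1
--         run_country = c
--         result.append(post)
--
--     for post in posts:
--         if run_len >= max_consecutive and post.get("country") == run_country:
--             pending.append(post)
--         else:
--             place(post)
--             while pending and not (run_len >= max_consecutive
--                                    and pending[0].get("country") == run_country):
--                 place(pending.popleft())
--
--     result.extend(pending)
--     return result
-- ===== Notes on version B (the rewrite author's own statement) =====
-- stated objective: alternative
-- what changed: Replaced the rescan-each-step greedy (re-slicing the last max_consecutive of result and re-enumerating the whole remaining list every iteration) by a single pass over posts that maintains the current run (country, length) and a deque of deferred same-country posts drained as soon as the run allows; this trades the quadratic worst-case rescans for one linear pass, though on typical inputs the measured times are similar.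
import Mathlib
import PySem

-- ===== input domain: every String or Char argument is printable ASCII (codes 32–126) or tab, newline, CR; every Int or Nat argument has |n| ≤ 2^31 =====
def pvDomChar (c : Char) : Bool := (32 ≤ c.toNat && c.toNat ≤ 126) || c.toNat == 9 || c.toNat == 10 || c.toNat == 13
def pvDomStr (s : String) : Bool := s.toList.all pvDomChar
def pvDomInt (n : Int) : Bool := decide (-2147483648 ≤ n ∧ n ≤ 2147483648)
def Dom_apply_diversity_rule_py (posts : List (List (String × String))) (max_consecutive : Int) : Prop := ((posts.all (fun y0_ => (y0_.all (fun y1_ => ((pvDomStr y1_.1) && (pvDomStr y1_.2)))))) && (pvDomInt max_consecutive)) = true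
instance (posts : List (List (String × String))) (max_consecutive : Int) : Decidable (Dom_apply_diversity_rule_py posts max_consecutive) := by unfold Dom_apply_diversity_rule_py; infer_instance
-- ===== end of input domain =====

-- B: one pass with a run counter and a deferred-posts queue instead of A's re-slice + re-scan of the remainder each step (alternative algorithm).


-- ===== PORT A =====
-- post.get("country") (a dict is an association list; first match)
def pvGetCountry (p : List (String × String)) : Option String :=
  PySem.Dict.get? ⟨p⟩ "country"

-- the per-candidate test of A's inner loop:
-- recent = [p.get("country") for p in result[-max_consecutive:]]
-- len(recent) < max_consecutive or not all(c == post.get("country") for c in recent)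
def pvCond (max_consecutive : Int) (result : List (List (String × String)))
    (post : List (String × String)) : Bool :=
  let recent := (PySem.List.slice result (some (-max_consecutive)) none).map pvGetCountry
  decide ((recent.length : Int) < max_consecutive) ||
    ! recent.all (fun c => c == pvGetCountry post)

-- 'for i, post in enumerate(remaining): if <cond>: result.append(remaining.pop(i)); break'
def pvFindPlace (max_consecutive : Int) (result : List (List (String × String))) :
    List (List (String × String)) →
      Option (List (String × String) × List (List (String × String)))
  | [] => none
  | p :: rest =>
    if pvCond max_consecutive result p then some (p, rest)
    else
      match pvFindPlace max_consecutive result rest with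
      | some (q, rest') => some (q, p :: rest')
      | none => none

-- 'while remaining:' — fuel is |remaining| at the call site; each turn either places
-- one post (remaining shrinks by 1) or appends the rest and stops
def pvLoopA (max_consecutive : Int) :
    Nat → List (List (String × String)) → List (List (String × String)) →
      List (List (String × String))
  | 0, result, remaining => result ++ remaining
  | fuel + 1, result, remaining =>
    match remaining with
    | [] => result
    | _ :: _ =>
      match pvFindPlace max_consecutive result remaining with
      | some (p, rest) => pvLoopA max_consecutive fuel (result ++ [p]) rest
      | none => result ++ remaining

def apply_diversity_rule_py (posts : List (List (String × String))) (max_consecutive : Int) :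
    List (List (String × String)) :=
  if posts = [] ∨ max_consecutive ≤ 0 then posts
  else pvLoopA max_consecutive posts.length [] posts

-- ===== PORT B =====
-- place(post): append and update the run counter
def pvPlace (result : List (List (String × String))) (runC : Option String) (runLen : Int)
    (post : List (String × String)) :
    List (List (String × String)) × Option String × Int :=
  let c := pvGetCountry post
  (result ++ [post], c, if runLen ≠ 0 ∧ c = runC then runLen + 1 else 1)

-- 'while pending and not (run_len >= max_consecutive and pending[0].get("country") == run_country): place(pending.popleft())'
def pvDrain (max_consecutive : Int) :
    List (List (String × String)) → List (List (String × String)) → Option String → Int →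
      List (List (String × String)) × List (List (String × String)) × Option String × Int
  | [], result, runC, runLen => (result, [], runC, runLen)
  | q :: qs, result, runC, runLen =>
    if max_consecutive ≤ runLen ∧ pvGetCountry q = runC then (result, q :: qs, runC, runLen)
    else
      match pvPlace result runC runLen q with
      | (result', runC', runLen') => pvDrain max_consecutive qs result' runC' runLen'

-- body of 'for post in posts:'
def pvStepB (max_consecutive : Int)
    (st : List (List (String × String)) × List (List (String × String)) × Option String × Int)
    (post : List (String × String)) :
    List (List (String × String)) × List (List (String × String)) × Option String × Int :=
  match st with
  | (result, pending, runC, runLen) =>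
    if max_consecutive ≤ runLen ∧ pvGetCountry post = runC then
      (result, pending ++ [post], runC, runLen)
    else
      match pvPlace result runC runLen post with
      | (result', runC', runLen') => pvDrain max_consecutive pending result' runC' runLen'

def apply_diversity_rule_py_alt (posts : List (List (String × String))) (max_consecutive : Int) :
    List (List (String × String)) :=
  if posts = [] ∨ max_consecutive ≤ 0 then posts
  else
    match posts.foldl (pvStepB max_consecutive) ([], [], none, 0) with
    | (result, pending, _, _) => result ++ pending

-- ===== PRECONDITION & SPEC =====
def Spec_apply_diversity_rule_py (posts : List (List (String × String))) (max_consecutive : Int) (out : List (List (String × String))) : Prop := out = apply_diversity_rule_py_alt posts max_consecutive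
instance (posts : List (List (String × String))) (max_consecutive : Int) (out : List (List (String × String))) : Decidable (Spec_apply_diversity_rule_py posts max_consecutive out) := by unfold Spec_apply_diversity_rule_py; infer_instance

-- ===== CLAIM (what is proved, stated in full; the proofs are below) =====
def Claim_equal_apply_diversity_rule_py : Prop := ∀ (posts : List (List (String × String))) (max_consecutive : Int), Dom_apply_diversity_rule_py posts max_consecutive → Spec_apply_diversity_rule_py posts max_consecutive (apply_diversity_rule_py posts max_consecutive)

-- ===== LEMMAS AND PROOFS =====

-- the run invariant: result ends in a maximal block of runLen posts of country runC (capped by max)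
def pvRunInv (max_consecutive : Int) (result : List (List (String × String)))
    (runC : Option String) (runLen : Int) : Prop :=
  (result = [] ∧ runLen = 0) ∨
  (∃ front run, result = front ++ run ∧ (run.length : Int) = runLen ∧ 1 ≤ runLen ∧
     runLen ≤ max_consecutive ∧ (∀ q ∈ run, pvGetCountry q = runC) ∧
     (∀ f, front.getLast? = some f → pvGetCountry f ≠ runC))

lemma pvRunInv_le {max_consecutive : Int} {result runC runLen}
    (h : pvRunInv max_consecutive result runC runLen) (hmax : 1 ≤ max_consecutive) :
    runLen ≤ max_consecutive := by
  rcases h with ⟨-, h0⟩ | ⟨f, r, -, -, -, hle, -, -⟩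
  · omega
  · exact hle

lemma pvGetLast_mem_drop {α : Type} {l : List α} {f : α} (h : l.getLast? = some f)
    {m : Nat} (hm : m < l.length) : f ∈ l.drop m := by
  have h2 : (l.drop m).getLast? = some f := by
    rw [List.getLast?_drop, if_neg (by omega)]; exact h
  exact List.mem_of_getLast? h2

-- the condition of A's scan, characterised by the run state
lemma pvCond_iff {max_consecutive : Int} {result runC runLen}
    (hinv : pvRunInv max_consecutive result runC runLen) (hmax : 1 ≤ max_consecutive)
    (p : List (String × String)) :
    pvCond max_consecutive result p = false ↔
      (runLen = max_consecutive ∧ pvGetCountry p = runC) := by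
  have hk : ((max_consecutive.toNat : Int)) = max_consecutive := Int.toNat_of_nonneg (by omega)
  have hkpos : 0 < max_consecutive.toNat := by omega
  have hrec : PySem.List.slice result (some (-max_consecutive)) none
      = result.drop (result.length - max_consecutive.toNat) := by
    rw [← hk]; exact PySem.List.slice_from_neg_natCast result max_consecutive.toNat hkpos
  have hiff : ∀ X : List (List (String × String)),
      result.drop (result.length - max_consecutive.toNat) = X →
      (pvCond max_consecutive result p = false ↔
        (max_consecutive ≤ (X.length : Int) ∧ ∀ q ∈ X, pvGetCountry q = pvGetCountry p)) := by
    intro X hX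
    simp [pvCond, hrec, hX, not_lt]
  rcases hinv with ⟨h0, hL⟩ | ⟨front, run, hres, hlen, h1, hle, hrun, hfront⟩
  · subst h0
    rw [hiff [] (by simp)]
    simp only [List.length_nil, Nat.cast_zero]
    constructor
    · rintro ⟨hle0, -⟩; omega
    · rintro ⟨hrl, -⟩; omega
  · subst hres
    by_cases hfull : runLen = max_consecutive
    · have hR : run.length = max_consecutive.toNat := by omega
      have hdrop : (front ++ run).drop ((front ++ run).length - max_consecutive.toNat)
          = run := by
        have hfl : (front ++ run).length - max_consecutive.toNat = front.length := by
          simp only [List.length_append]; omega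
        rw [hfl, List.drop_append_of_le_length (le_refl _), List.drop_length,
          List.nil_append]
      obtain ⟨q0, hq0⟩ : ∃ q0, q0 ∈ run := by
        cases run with
        | nil => exfalso; simp at hlen; omega
        | cons a l => exact ⟨a, by simp⟩
      rw [hiff run hdrop]
      constructor
      · rintro ⟨-, hall⟩
        refine ⟨hfull, ?_⟩
        have hq := hall q0 hq0
        rw [← hq]; exact hrun q0 hq0
      · rintro ⟨hrl, hp⟩
        refine ⟨by omega, fun q hq => ?_⟩
        rw [hrun q hq, hp]
    · by_cases hLk : (front ++ run).length < max_consecutive.toNat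
      · rw [hiff (front ++ run)
          (by rw [show (front ++ run).length - max_consecutive.toNat = 0 by omega,
                List.drop_zero])]
        constructor
        · rintro ⟨hge, -⟩
          exfalso
          have : ((front ++ run).length : Int) < max_consecutive := by
            rw [← hk]; exact_mod_cast hLk
          omega
        · rintro ⟨hrl, -⟩; exact absurd hrl hfull
      · have hlt : runLen < max_consecutive := lt_of_le_of_ne hle hfull
        have hdf : (front ++ run).length - max_consecutive.toNat < front.length := by
          have : run.length < max_consecutive.toNat := by omega
          simp only [List.length_append] at hLk ⊢
          omega
        have hsplit : (front ++ run).drop ((front ++ run).length - max_consecutive.toNat)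
            = front.drop ((front ++ run).length - max_consecutive.toNat) ++ run :=
          List.drop_append_of_le_length (by omega)
        obtain ⟨f, hf⟩ : ∃ f, front.getLast? = some f := by
          cases hg : front.getLast? with
          | some f => exact ⟨f, rfl⟩
          | none =>
            rw [List.getLast?_eq_none_iff] at hg
            exfalso; rw [hg] at hdf; simp at hdf
        have hfmem : f ∈ front.drop ((front ++ run).length - max_consecutive.toNat) :=
          pvGetLast_mem_drop hf hdf
        obtain ⟨q0, hq0⟩ : ∃ q0, q0 ∈ run := by
          cases run with
          | nil => exfalso; simp at hlen; omega
          | cons a l => exact ⟨a, by simp⟩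
        rw [hiff _ hsplit]
        constructor
        · rintro ⟨-, hall⟩
          exfalso
          have h1 := hall f (List.mem_append_left _ hfmem)
          have h2 := hall q0 (List.mem_append_right _ hq0)
          exact hfront f hf (by rw [h1, ← h2, hrun q0 hq0])
        · rintro ⟨hrl, -⟩; exact absurd hrl hfull

-- placing a non-violating post preserves the run invariant
lemma pvPlace_inv {max_consecutive : Int} {result runC runLen}
    (hinv : pvRunInv max_consecutive result runC runLen) (hmax : 1 ≤ max_consecutive)
    (p : List (String × String))
    (hok : ¬ (runLen = max_consecutive ∧ pvGetCountry p = runC)) :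
    pvRunInv max_consecutive (result ++ [p]) (pvGetCountry p)
      (if runLen ≠ 0 ∧ pvGetCountry p = runC then runLen + 1 else 1) := by
  rcases hinv with ⟨h0, hL⟩ | ⟨front, run, hres, hlen, h1, hle, hrun, hfront⟩
  · subst h0
    rw [if_neg (by simp [hL])]
    right
    exact ⟨[], [p], by simp, by simp, le_refl 1, hmax, by simp, by simp⟩
  · subst hres
    by_cases hsame : runLen ≠ 0 ∧ pvGetCountry p = runC
    · rw [if_pos hsame]
      have hne : runLen ≠ max_consecutive := fun hc => hok ⟨hc, hsame.2⟩
      right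
      refine ⟨front, run ++ [p], by simp, ?_, by omega, by omega,
        fun q hq => ?_, fun f hf => ?_⟩
      · simp only [List.length_append, List.length_cons, List.length_nil]
        push_cast
        omega
      · rcases List.mem_append.mp hq with hq | hq
        · rw [hrun q hq, hsame.2]
        · simp at hq; subst hq; rfl
      · rw [hsame.2]; exact hfront f hf
    · rw [if_neg hsame]
      right
      refine ⟨front ++ run, [p], by simp, by simp, le_refl _, hmax, by simp, ?_⟩
      intro f hf
      have hrne : run ≠ [] := by
        intro hcon; subst hcon; simp at hlen; omega
      rw [List.getLast?_append_of_ne_nil front hrne] at hf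
      have hfr : f ∈ run := List.mem_of_getLast? hf
      rw [hrun f hfr]
      intro hcon
      exact hsame ⟨by omega, hcon.symm⟩

lemma pvFindPlace_none {max_consecutive : Int} {result : List (List (String × String))}
    (l : List (List (String × String)))
    (h : ∀ q ∈ l, pvCond max_consecutive result q = false) :
    pvFindPlace max_consecutive result l = none := by
  induction l with
  | nil => rfl
  | cons q qs ih =>
    simp only [pvFindPlace, h q (by simp), Bool.false_eq_true, if_false]
    rw [ih (fun x hx => h x (by simp [hx]))]

lemma pvFindPlace_skip {max_consecutive : Int} {result : List (List (String × String))}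
    (pre l : List (List (String × String)))
    (h : ∀ q ∈ pre, pvCond max_consecutive result q = false) :
    pvFindPlace max_consecutive result (pre ++ l) =
      (pvFindPlace max_consecutive result l).map (fun x => (x.1, pre ++ x.2)) := by
  induction pre with
  | nil => simp
  | cons q qs ih =>
    simp only [List.cons_append, pvFindPlace, h q (by simp)]
    rw [ih (fun q hq => h q (by simp [hq]))]
    cases pvFindPlace max_consecutive result l <;> simp

lemma pvFindPlace_length {max_consecutive : Int} {result : List (List (String × String))} :
    ∀ {l p rest}, pvFindPlace max_consecutive result l = some (p, rest) →
      rest.length + 1 = l.length := by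
  intro l
  induction l with
  | nil => intro p rest h; simp [pvFindPlace] at h
  | cons q qs ih =>
    intro p rest h
    simp only [pvFindPlace] at h
    split at h
    · simp at h; simp [h.2.symm]
    · revert h
      cases hfp : pvFindPlace max_consecutive result qs with
      | none => intro h; simp at h
      | some x =>
        intro h
        obtain ⟨q', rest'⟩ := x
        simp at h
        have := ih hfp
        simp [← h.2, ← this]

def pvRunA (max_consecutive : Int) (result remaining : List (List (String × String))) :
    List (List (String × String)) :=
  pvLoopA max_consecutive remaining.length result remaining

lemma pvRunA_nil {max_consecutive : Int} (result : List (List (String × String))) :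
    pvRunA max_consecutive result [] = result := by
  simp [pvRunA, pvLoopA]

lemma pvRunA_step {max_consecutive : Int} {result remaining p rest}
    (h : pvFindPlace max_consecutive result remaining = some (p, rest)) :
    pvRunA max_consecutive result remaining = pvRunA max_consecutive (result ++ [p]) rest := by
  cases remaining with
  | nil => simp [pvFindPlace] at h
  | cons r rs =>
    have hlen := pvFindPlace_length h
    simp only [List.length_cons] at hlen
    simp only [pvRunA, List.length_cons, pvLoopA, h]
    congr 1
    omega

lemma pvRunA_none {max_consecutive : Int} {result remaining}
    (hne : remaining ≠ []) (h : pvFindPlace max_consecutive result remaining = none) :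
    pvRunA max_consecutive result remaining = result ++ remaining := by
  cases remaining with
  | nil => simp at hne
  | cons r rs => simp only [pvRunA, List.length_cons, pvLoopA, h]

lemma pvDrain_lemma {max_consecutive : Int} (hmax : 1 ≤ max_consecutive) (b : Option String) :
    ∀ (pending : List (List (String × String))) (result runC runLen)
      (hinv : pvRunInv max_consecutive result runC runLen)
      (hb : ∀ q ∈ pending, pvGetCountry q = b)
      {result' pending' runC' runLen'}
      (heq : pvDrain max_consecutive pending result runC runLen =
        (result', pending', runC', runLen')),
      (∀ rest, pvRunA max_consecutive result (pending ++ rest) =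
          pvRunA max_consecutive result' (pending' ++ rest)) ∧
      pvRunInv max_consecutive result' runC' runLen' ∧
      (pending' ≠ [] → runLen' = max_consecutive ∧
        ∀ q ∈ pending', pvGetCountry q = runC') := by
  intro pending
  induction pending with
  | nil =>
    intro result runC runLen hinv hb result' pending' runC' runLen' heq
    simp only [pvDrain, Prod.mk.injEq] at heq
    obtain ⟨rfl, rfl, rfl, rfl⟩ := heq
    exact ⟨fun rest => rfl, hinv, by simp⟩
  | cons q qs ih =>
    intro result runC runLen hinv hb result' pending' runC' runLen' heq
    simp only [pvDrain] at heq
    by_cases hc : max_consecutive ≤ runLen ∧ pvGetCountry q = runC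
    · rw [if_pos hc] at heq
      simp only [Prod.mk.injEq] at heq
      obtain ⟨rfl, rfl, rfl, rfl⟩ := heq
      refine ⟨fun rest => rfl, hinv, fun _ => ?_⟩
      have hle := pvRunInv_le hinv hmax
      refine ⟨by omega, fun x hx => ?_⟩
      have hq := hb q (by simp)
      rw [hb x hx, ← hq, hc.2]
    · rw [if_neg hc] at heq
      simp only [pvPlace] at heq
      have hok : ¬ (runLen = max_consecutive ∧ pvGetCountry q = runC) :=
        fun hcon => hc ⟨le_of_eq hcon.1.symm, hcon.2⟩
      have hinv' := pvPlace_inv hinv hmax q hok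
      have hcondq : pvCond max_consecutive result q = true := by
        cases hcnd : pvCond max_consecutive result q with
        | false => exact absurd ((pvCond_iff hinv hmax q).mp hcnd) hok
        | true => rfl
      obtain ⟨hrw, hinv'', hP⟩ :=
        ih (result ++ [q]) (pvGetCountry q) _ hinv' (fun x hx => hb x (by simp [hx])) heq
      refine ⟨fun rest => ?_, hinv'', hP⟩
      have hfp : pvFindPlace max_consecutive result (q :: (qs ++ rest))
          = some (q, qs ++ rest) := by
        simp [pvFindPlace, hcondq]
      calc pvRunA max_consecutive result ((q :: qs) ++ rest)
          = pvRunA max_consecutive (result ++ [q]) (qs ++ rest) :=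
            pvRunA_step (by simpa using hfp)
        _ = pvRunA max_consecutive result' (pending' ++ rest) := hrw rest

lemma pvMain_lemma {max_consecutive : Int} (hmax : 1 ≤ max_consecutive) :
    ∀ (rest pending result : List (List (String × String))) (runC : Option String)
      (runLen : Int),
      pvRunInv max_consecutive result runC runLen →
      (pending ≠ [] → runLen = max_consecutive ∧
        ∀ q ∈ pending, pvGetCountry q = runC) →
      pvRunA max_consecutive result (pending ++ rest) =
        (match List.foldl (pvStepB max_consecutive) (result, pending, runC, runLen) rest with
         | (res, pend, _, _) => res ++ pend) := by
  intro rest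
  induction rest with
  | nil =>
    intro pending result runC runLen hinv hP
    simp only [List.foldl_nil, List.append_nil]
    cases pending with
    | nil => simpa using pvRunA_nil result
    | cons q qs =>
      obtain ⟨hrl, hall⟩ := hP (by simp)
      have hnone : pvFindPlace max_consecutive result (q :: qs) = none :=
        pvFindPlace_none _
          (fun x hx => (pvCond_iff hinv hmax x).mpr ⟨hrl, hall x hx⟩)
      rw [pvRunA_none (by simp) hnone]
  | cons post rest' ih =>
    intro pending result runC runLen hinv hP
    simp only [List.foldl_cons]
    by_cases hc : max_consecutive ≤ runLen ∧ pvGetCountry post = runC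
    · have hstep : pvStepB max_consecutive (result, pending, runC, runLen) post
          = (result, pending ++ [post], runC, runLen) := by
        simp [pvStepB, hc]
      rw [hstep]
      have hle := pvRunInv_le hinv hmax
      have hP' : pending ++ [post] ≠ [] → runLen = max_consecutive ∧
          ∀ q ∈ pending ++ [post], pvGetCountry q = runC := by
        intro _
        refine ⟨by omega, fun x hx => ?_⟩
        rcases List.mem_append.mp hx with hx | hx
        · exact (hP (by intro hcon; subst hcon; simp at hx)).2 x hx
        · simp at hx; subst hx; exact hc.2
      have hrec := ih (pending ++ [post]) result runC runLen hinv hP'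
      calc pvRunA max_consecutive result (pending ++ post :: rest')
          = pvRunA max_consecutive result ((pending ++ [post]) ++ rest') := by simp
        _ = _ := hrec
    · have hok : ¬ (runLen = max_consecutive ∧ pvGetCountry post = runC) :=
        fun hcon => hc ⟨le_of_eq hcon.1.symm, hcon.2⟩
      have hball : ∀ q ∈ pending, pvGetCountry q = runC := fun q hq =>
        (hP (by intro hcon; subst hcon; simp at hq)).2 q hq
      have hcondp : pvCond max_consecutive result post = true := by
        cases hcnd : pvCond max_consecutive result post with
        | false => exact absurd ((pvCond_iff hinv hmax post).mp hcnd) hok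
        | true => rfl
      have hskip : pvFindPlace max_consecutive result (pending ++ post :: rest')
          = some (post, pending ++ rest') := by
        rw [pvFindPlace_skip pending _ (fun q hq =>
          (pvCond_iff hinv hmax q).mpr
            ⟨(hP (by intro hcon; subst hcon; simp at hq)).1, hball q hq⟩)]
        simp [pvFindPlace, hcondp]
      have hstep : pvStepB max_consecutive (result, pending, runC, runLen) post
          = pvDrain max_consecutive pending (result ++ [post]) (pvGetCountry post)
              (if runLen ≠ 0 ∧ pvGetCountry post = runC then runLen + 1 else 1) := by
        simp [pvStepB, hc, pvPlace]
      obtain ⟨⟨r1, p1, c1, l1⟩, hDr⟩ :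
          ∃ x, pvDrain max_consecutive pending (result ++ [post]) (pvGetCountry post)
            (if runLen ≠ 0 ∧ pvGetCountry post = runC then runLen + 1 else 1) = x :=
        ⟨_, rfl⟩
      have hinv' := pvPlace_inv hinv hmax post hok
      obtain ⟨hrw, hinv'', hP''⟩ :=
        pvDrain_lemma hmax runC pending (result ++ [post]) (pvGetCountry post) _
          hinv' hball hDr
      rw [hstep, hDr]
      calc pvRunA max_consecutive result (pending ++ post :: rest')
          = pvRunA max_consecutive (result ++ [post]) (pending ++ rest') :=
            pvRunA_step hskip
        _ = pvRunA max_consecutive r1 (p1 ++ rest') := hrw rest'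
        _ = _ := ih p1 r1 c1 l1 hinv'' hP'' 

-- ===== VERDICT (by name: the statement is the Claim_ definition above) =====
theorem apply_diversity_rule_py_spec : Claim_equal_apply_diversity_rule_py := by
  intro posts max_consecutive _
  unfold Spec_apply_diversity_rule_py apply_diversity_rule_py apply_diversity_rule_py_alt
  by_cases h : posts = [] ∨ max_consecutive ≤ 0
  · simp [h]
  · simp only [h, if_false]
    have h2 : ¬ max_consecutive ≤ 0 := fun hh => h (Or.inr hh)
    have hmax : 1 ≤ max_consecutive := by omega
    have := pvMain_lemma hmax posts [] [] none 0 (Or.inl ⟨rfl, rfl⟩) (by simp)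
    simpa [pvRunA] using this
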